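-- pv_equiv track=rewrite | github.com/ViAchKoN/Courses-Python-Stepik-Algorithms_theory_and_practice_Data_structures | 1 Basic data structures/stack_with_max.py | get_stack_max
-- ===== SOURCE A (Python) =====
-- import typing as tp
--
-- def get_stack_max(command_list: tp.List[str]) -> tp.List[int]:
--     result = []
--     stack_max = [0]
--
--     command: tp.Any
--     for command in command_list:
--         command = command.split()
--         if command[0] == 'push':
--             stack_max.append(max(stack_max[-1], int(command[1])))
--         elif command[0] == 'pop':
--             stack_max.pop()
--         else:
--             result.append(stack_max[-1] if stack_max else 0)
--     return result
-- ===== SOURCE B (Python) =====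
-- def _parse_command(command):
--     words = command.split()
--     if words[0] == 'push':
--         return ('push', int(words[1]))
--     if words[0] == 'pop':
--         return ('pop', 0)
--     return ('max', 0)
--
--
-- def get_stack_max(command_list):
--     ops = [_parse_command(c) for c in command_list]
--     result = []
--     stack = [0]
--     for kind, value in ops:
--         if kind == 'push':
--             stack.append(value)
--         elif kind == 'pop':
--             stack.pop()
--         else:
--             result.append(max(stack) if stack else 0)
--     return result
-- ===== Notes on version B (the rewrite author's own statement) =====
-- stated objective: alternative
-- what changed: B is a two-stage pipeline: it first parses every command into a typed (kind, value) op, then interprets the op list over a stack of the raw pushed values (seeded with 0), recomputing the maximum by scanning the stack at each max query instead of A's single string-dispatch loop over an incrementally maintained prefix-max stack.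
import Mathlib
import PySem

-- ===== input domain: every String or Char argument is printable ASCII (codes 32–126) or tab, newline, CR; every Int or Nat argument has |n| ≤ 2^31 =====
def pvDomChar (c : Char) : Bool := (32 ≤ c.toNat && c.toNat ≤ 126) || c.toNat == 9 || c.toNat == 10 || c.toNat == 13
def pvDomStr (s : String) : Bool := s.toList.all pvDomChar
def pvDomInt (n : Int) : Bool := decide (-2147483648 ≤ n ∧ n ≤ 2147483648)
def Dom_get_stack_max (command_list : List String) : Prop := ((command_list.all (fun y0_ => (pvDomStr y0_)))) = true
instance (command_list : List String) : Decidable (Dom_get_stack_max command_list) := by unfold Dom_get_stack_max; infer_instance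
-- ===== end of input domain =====

-- B is a two-stage pipeline (parse commands into typed ops, then interpret over a raw-value stack rescanned at each max query) instead of A's one-pass string dispatch over a prefix-max stack (alternative algorithm, same results).


-- ===== PORT A =====
-- the loop of A: state = (result so far, stack_max with head = top); none = Python raises
def runA : List String → List Int → List Int → Option (List Int)
  | [], res, _ => some res
  | c :: rest, res, stk =>
    match PySem.Str.split₀ c with
    | [] => none                                   -- command[0]: IndexError
    | t :: args =>
      if t = "push" then
        match stk with
        | [] => none                               -- stack_max[-1]: IndexError
        | top :: _ =>
          match args with
          | [] => none                             -- command[1]: IndexError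
          | a :: _ =>
            match PySem.Int.ofStr? a with
            | none => none                         -- int(...): ValueError
            | some v => runA rest res (max top v :: stk)
      else if t = "pop" then
        match stk with
        | [] => none                               -- pop from empty list: IndexError
        | _ :: s => runA rest res s
      else
        runA rest (res ++ [match stk with | [] => 0 | top :: _ => top]) stk

def get_stack_max (command_list : List String) : List Int :=
  (runA command_list [] [0]).getD []

-- ===== PORT B =====
-- typed op produced by B's parsing stage: the Python pair ('push'|'pop'|'max', value)
inductive PvOp where
  | push : Int → PvOp
  | pop : PvOp
  | query : PvOp
deriving DecidableEq, Repr

-- _parse_command: none = Python raises (IndexError on words[0]/words[1], ValueError from int)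
def pvParseCommand (command : String) : Option PvOp :=
  match PySem.Str.split₀ command with
  | [] => none
  | w :: ws =>
    if w = "push" then
      match ws with
      | [] => none
      | a :: _ => (PySem.Int.ofStr? a).map PvOp.push
        else if w = "pop" then some PvOp.pop
    else some PvOp.query

-- B's interpreter loop over the parsed ops: state = (result, value stack, head = top)
def pvInterp : List PvOp → List Int → List Int → Option (List Int)
  | [], res, _ => some res
  | PvOp.push v :: ops, res, stack => pvInterp ops res (v :: stack)
  | PvOp.pop :: ops, res, stack =>
    match stack with
    | [] => none                                   -- pop from empty list: IndexError
    | _ :: s => pvInterp ops res s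
  | PvOp.query :: ops, res, stack =>
    -- max(stack) if stack else 0 (max? = none exactly on the empty list)
    pvInterp ops (res ++ [(PySem.List.max? stack (fun x => x)).getD 0]) stack

def get_stack_max_alt (command_list : List String) : List Int :=
  ((command_list.mapM pvParseCommand).bind (fun ops => pvInterp ops [] [0])).getD []

-- ===== PRECONDITION & SPEC =====
-- helpers used by Pre_: per-command well-formedness and push/pop prefix counts
def pvLocal (s : String) : Prop :=
  PySem.Str.split₀ s ≠ [] ∧
  ((PySem.Str.split₀ s).head? = some "push" →
    2 ≤ (PySem.Str.split₀ s).length ∧ (PySem.Int.ofStr? ((PySem.Str.split₀ s)[1]!)).isSome = true)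
def pvIsPP (s : String) : Bool :=
  (PySem.Str.split₀ s).head? = some "push" || (PySem.Str.split₀ s).head? = some "pop"
def pvPushes (l : List String) : Nat :=
  (l.filter (fun s => (PySem.Str.split₀ s).head? = some "push")).length
def pvPops (l : List String) : Nat :=
  (l.filter (fun s => (PySem.Str.split₀ s).head? = some "pop")).length

-- Pre_ excludes exactly the inputs where A raises: an empty command, a push without a
-- parseable integer argument, or a push/pop reached when pops so far exceed pushes so far
-- (the stack, seeded with one element, is then empty and A's stack_max[-1] / pop raises).
def Pre_get_stack_max (command_list : List String) : Prop :=
  ∀ i, (h : i < command_list.length) →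
    pvLocal command_list[i] ∧
    (pvIsPP command_list[i] = true →
      pvPops (command_list.take i) ≤ pvPushes (command_list.take i))
instance (command_list : List String) : Decidable (Pre_get_stack_max command_list) := by
  unfold Pre_get_stack_max pvLocal; infer_instance

def pvWitness_get_stack_max : List String := ["push 2", "max", "push 10", "max", "pop", "max"]

def Spec_get_stack_max (command_list : List String) (out : List Int) : Prop := out = get_stack_max_alt command_list
instance (command_list : List String) (out : List Int) : Decidable (Spec_get_stack_max command_list out) := by unfold Spec_get_stack_max; infer_instance

-- ===== CLAIM (what is proved, stated in full; the proofs are below) =====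
def Claim_equal_get_stack_max : Prop := ∀ (command_list : List String), Dom_get_stack_max command_list → Pre_get_stack_max command_list → Spec_get_stack_max command_list (get_stack_max command_list)

-- ===== LEMMAS AND PROOFS =====

-- running well-formedness with the current stack depth d (the proof-side form of Pre_)
def Ok : List String → Nat → Prop
  | [], _ => True
  | c :: rest, d =>
    match PySem.Str.split₀ c with
    | [] => False
    | t :: args =>
      if t = "push" then
        1 ≤ d ∧ args ≠ [] ∧ (PySem.Int.ofStr? args[0]!).isSome = true ∧ Ok rest (d + 1)
      else if t = "pop" then
        1 ≤ d ∧ Ok rest (d - 1)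
      else Ok rest d

-- A's stack as a function of B's stack: suffix maxima (head = top)
def smax : List Int → List Int
  | [] => []
  | x :: xs => (match smax xs with | [] => x | h :: _ => max h x) :: smax xs

theorem foldl_max_comm (l : List Int) : ∀ a b : Int, l.foldl max (max a b) = max a (l.foldl max b) := by
  induction l with
  | nil => intro a b; rfl
  | cons c t ih =>
    intro a b
    simp only [List.foldl_cons]
    rw [max_assoc, ih]

theorem smax_head (x : Int) (xs : List Int) :
    smax (x :: xs) = (xs.foldl max x) :: smax xs := by
  induction xs generalizing x with
  | nil => rfl
  | cons a t ih =>
    rw [show smax (x :: a :: t)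
        = (match smax (a :: t) with | [] => x | h :: _ => max h x) :: smax (a :: t) from rfl,
      ih a]
    simp only [List.foldl_cons]
    rw [foldl_max_comm, max_comm]

-- the central bridge: on Ok inputs, parsing succeeds, B's interpreter returns, and A's
-- loop on the prefix-max image of B's stack computes the same option value
theorem runA_eq_parse_interp (cl : List String) : ∀ (res : List Int) (stkB : List Int),
    Ok cl stkB.length →
    ∃ ops, cl.mapM pvParseCommand = some ops ∧
      runA cl res (smax stkB) = pvInterp ops res stkB := by
  induction cl with
  | nil => intro res stkB _; exact ⟨[], by simp, rfl⟩
  | cons c rest ih =>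
    intro res stkB hok
    simp only [Ok] at hok
    cases hsp : PySem.Str.split₀ c with
    | nil => rw [hsp] at hok; exact absurd hok (by simp)
    | cons t args =>
      rw [hsp] at hok
      simp only [runA, pvParseCommand, hsp, List.mapM_cons]
      by_cases hpush : t = "push"
      · simp only [if_pos hpush] at *
        obtain ⟨hd, hargs, hparse, hrest⟩ := hok
        cases stkB with
        | nil => simp at hd
        | cons b bs =>
          cases args with
          | nil => exact absurd rfl hargs
          | cons a args' =>
            simp only [List.getElem!_cons_zero] at hparse
            cases hv : PySem.Int.ofStr? a with
            | none => rw [hv] at hparse; simp at hparse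
            | some v =>
              obtain ⟨ops', hops', heq⟩ := ih res (v :: b :: bs) (by simpa using hrest)
              refine ⟨PvOp.push v :: ops', by simp [hops', hv], ?_⟩
              simp only [smax_head b bs, hv, pvInterp]
              have hvb : max (bs.foldl max b) v :: (bs.foldl max b) :: smax bs
                  = smax (v :: b :: bs) := by
                simp only [smax_head v (b :: bs), smax_head b bs, List.foldl_cons]
                rw [foldl_max_comm, max_comm]
              rw [hvb]
              exact heq
      · simp only [if_neg hpush] at *
        by_cases hpop : t = "pop"
        · simp only [if_pos hpop] at *
          obtain ⟨hd, hrest⟩ := hok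
          cases stkB with
          | nil => simp at hd
          | cons b bs =>
            obtain ⟨ops', hops', heq⟩ := ih res bs (by simpa using hrest)
            refine ⟨PvOp.pop :: ops', by simp [hops'], ?_⟩
            simp only [smax_head b bs, pvInterp]
            exact heq
        · simp only [if_neg hpop] at *
          cases stkB with
          | nil =>
            obtain ⟨ops', hops', heq⟩ := ih (res ++ [0]) [] hok
            refine ⟨PvOp.query :: ops', by simp [hops'], ?_⟩
            simpa [smax, pvInterp, PySem.List.max?] using heq
          | cons b bs =>
            obtain ⟨ops', hops', heq⟩ := ih (res ++ [bs.foldl max b]) (b :: bs) hok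
            refine ⟨PvOp.query :: ops', by simp [hops'], ?_⟩
            have hm : (PySem.List.max? (b :: bs) (fun x => x)).getD 0 = bs.foldl max b := by
              rw [PySem.List.max?_id_cons]; rfl
            simp only [smax_head b bs, pvInterp, hm] at heq ⊢
            exact heq

theorem pre_to_ok (cl : List String) : ∀ d : Nat,
    (∀ i, (h : i < cl.length) →
      pvLocal cl[i] ∧ (pvIsPP cl[i] = true → pvPops (cl.take i) + 1 ≤ d + pvPushes (cl.take i))) →
    Ok cl d := by
  induction cl with
  | nil => intro d _; trivial
  | cons c rest ih =>
    intro d hpre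
    have h0 := hpre 0 (by simp)
    simp only [List.getElem_cons_zero, List.take_zero, pvPops, pvPushes, List.filter_nil,
      List.length_nil] at h0
    obtain ⟨⟨hne, hpusharg⟩, hcount⟩ := h0
    simp only [Ok]
    cases hsp : PySem.Str.split₀ c with
    | nil => exact hne hsp
    | cons t args =>
      rw [hsp] at hpusharg
      simp only [List.head?_cons] at hpusharg
      have hstep : ∀ d', (pvPops [c] + d' = d + pvPushes [c] ∨
          (pvPops [c] = 0 ∧ pvPushes [c] = 0 ∧ d' = d)) →
          (∀ i, (h : i < rest.length) →
            pvLocal rest[i] ∧ (pvIsPP rest[i] = true →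
              pvPops (rest.take i) + 1 ≤ d' + pvPushes (rest.take i))) := by
        intro d' hd' i h
        have hi := hpre (i + 1) (by simpa using Nat.succ_lt_succ h)
        simp only [List.getElem_cons_succ, List.take_succ_cons] at hi
        refine ⟨hi.1, fun hpp => ?_⟩
        have := hi.2 hpp
        have hsplitP : pvPops (c :: rest.take i) = pvPops [c] + pvPops (rest.take i) := by
          simp [pvPops, List.filter_cons]; split <;> simp <;> omega
        have hsplitQ : pvPushes (c :: rest.take i) = pvPushes [c] + pvPushes (rest.take i) := by
          simp [pvPushes, List.filter_cons]; split <;> simp <;> omega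
        rw [hsplitP, hsplitQ] at this
        omega
      by_cases hpush : t = "push"
      · simp only [if_pos hpush]
        have hcnt : pvPushes [c] = 1 ∧ pvPops [c] = 0 := by
          constructor <;> simp [pvPushes, pvPops, hsp, hpush]
        have hd : 1 ≤ d := by
          have := hcount (by simp [pvIsPP, hsp, hpush]); omega
        have hp := hpusharg (by rw [hpush])
        refine ⟨hd, ?_, ?_, ih (d + 1) (hstep (d + 1) (by omega))⟩
        · intro hc; rw [hc] at hp; simp at hp
        · have h2 := hp.1
          have := hp.2
          cases args with
          | nil => simp at h2
          | cons a args' => simpa using this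
      · simp only [if_neg hpush]
        by_cases hpop : t = "pop"
        · simp only [if_pos hpop]
          have hcnt : pvPushes [c] = 0 ∧ pvPops [c] = 1 := by
            constructor <;> simp [pvPushes, pvPops, hsp, hpop]
          have hd : 1 ≤ d := by
            have := hcount (by simp [pvIsPP, hsp, hpop]); omega
          exact ⟨hd, ih (d - 1) (hstep (d - 1) (by omega))⟩
        · simp only [if_neg hpop]
          have hcnt : pvPushes [c] = 0 ∧ pvPops [c] = 0 := by
            constructor <;> simp [pvPushes, pvPops, hsp, hpush, hpop]
          exact ih d (hstep d (by omega))

-- ===== VERDICT (by name: the statement is the Claim_ definition above) =====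
theorem get_stack_max_spec : Claim_equal_get_stack_max := by
  intro cl _ hpre
  unfold Spec_get_stack_max get_stack_max get_stack_max_alt
  have hok : Ok cl 1 := by
    apply pre_to_ok cl 1
    intro i h
    obtain ⟨h1, h2⟩ := hpre i h
    exact ⟨h1, fun hpp => by have := h2 hpp; omega⟩
  obtain ⟨ops, hops, heq⟩ := runA_eq_parse_interp cl [] [0] (by simpa using hok)
  have hs : smax [0] = [0] := rfl
  rw [hs] at heq
  rw [heq, hops]; rfl
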